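-- pv_equiv track=rewrite | github.com/Jeffrey04/aoc | 2024/day13/aoc2024-d13-python/src/aoc2024_d13_python/day13.py | move_set
-- ===== SOURCE A (Python) =====
-- from functools import reduce
--
-- def move(current: tuple[int, int], incoming: tuple[int, int]) -> tuple[int, int]:
--     return tuple((c + i) for c, i in zip(current, incoming))  # type: ignore
--
-- def move_set(
--     current: tuple[int, int], button_count: dict[tuple[int, int], int]
-- ) -> tuple[int, int]:
--     return reduce(
--         move,
--         (
--             (vector[0] * count, vector[1] * count)
--             for vector, count in button_count.items()
--         ),
--         current,
--     )
-- ===== SOURCE B (Python) =====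
-- def move_set(current, button_count):
--     x = current[0] + sum(vector[0] * count for vector, count in button_count.items())
--     y = current[1] + sum(vector[1] * count for vector, count in button_count.items())
--     return (x, y)
-- ===== Notes on version B (the rewrite author's own statement) =====
-- stated objective: idiomatic
-- what changed: Replaces the reduce over tuple-valued 'move' steps with two independent per-coordinate scalar sums added to the start point.
import Mathlib
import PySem

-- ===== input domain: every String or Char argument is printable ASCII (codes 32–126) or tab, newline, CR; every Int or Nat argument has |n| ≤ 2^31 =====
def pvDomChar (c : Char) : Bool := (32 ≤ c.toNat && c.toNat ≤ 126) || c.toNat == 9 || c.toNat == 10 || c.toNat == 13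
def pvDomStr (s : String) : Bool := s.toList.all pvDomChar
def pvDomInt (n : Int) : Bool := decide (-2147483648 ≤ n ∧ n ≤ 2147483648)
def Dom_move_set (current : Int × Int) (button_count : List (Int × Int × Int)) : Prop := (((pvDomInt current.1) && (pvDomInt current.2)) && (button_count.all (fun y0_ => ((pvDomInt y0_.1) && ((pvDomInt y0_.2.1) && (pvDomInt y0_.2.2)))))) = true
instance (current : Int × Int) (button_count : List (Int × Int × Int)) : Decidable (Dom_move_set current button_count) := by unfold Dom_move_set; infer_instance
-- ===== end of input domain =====

-- B computes each coordinate as a separate scalar sum instead of reducing with a tuple-valued move step (idiomatic decomposition).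


-- ===== PORT A =====
-- helper 'move' from A: componentwise addition of two pairs
def pvMove (current : Int × Int) (incoming : Int × Int) : Int × Int :=
  (current.1 + incoming.1, current.2 + incoming.2)

-- A: reduce(move, ((v0*c, v1*c) for (v0,v1),c in items), current)
def move_set (current : Int × Int) (button_count : List (Int × Int × Int)) : Int × Int :=
  (button_count.map (fun vc => (vc.1 * vc.2.2, vc.2.1 * vc.2.2))).foldl pvMove current

-- ===== PORT B =====
-- B: two independent per-coordinate sums
def move_set_alt (current : Int × Int) (button_count : List (Int × Int × Int)) : Int × Int :=
  (current.1 + (button_count.map (fun vc => vc.1 * vc.2.2)).sum,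
   current.2 + (button_count.map (fun vc => vc.2.1 * vc.2.2)).sum)

-- ===== PRECONDITION & SPEC =====
def Spec_move_set (current : Int × Int) (button_count : List (Int × Int × Int)) (out : Int × Int) : Prop := out = move_set_alt current button_count
instance (current : Int × Int) (button_count : List (Int × Int × Int)) (out : Int × Int) : Decidable (Spec_move_set current button_count out) := by unfold Spec_move_set; infer_instance

-- ===== CLAIM (what is proved, stated in full; the proofs are below) =====
def Claim_equal_move_set : Prop := ∀ (current : Int × Int) (button_count : List (Int × Int × Int)), Dom_move_set current button_count → Spec_move_set current button_count (move_set current button_count)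

-- ===== LEMMAS AND PROOFS =====

-- ===== VERDICT (by name: the statement is the Claim_ definition above) =====
theorem pv_fold_sum (current : Int × Int) (bc : List (Int × Int × Int)) :
    (bc.map (fun vc => (vc.1 * vc.2.2, vc.2.1 * vc.2.2))).foldl pvMove current =
    (current.1 + (bc.map (fun vc => vc.1 * vc.2.2)).sum,
     current.2 + (bc.map (fun vc => vc.2.1 * vc.2.2)).sum) := by
  induction bc generalizing current with
  | nil => simp
  | cons h t ih => simp [pvMove, ih]; constructor <;> ring

theorem move_set_spec : Claim_equal_move_set := by
  intro current bc _
  unfold Spec_move_set move_set move_set_alt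
  exact pv_fold_sum current bc
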